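-- pv_equiv track=rewrite | github.com/xiaojiou176-open/apple-notes-forensics | notes_recovery/services/case_diff.py | _review_surface_presence
-- ===== SOURCE A (Python) =====
-- REVIEW_SURFACES = (
--     ("review_index", {"review_index"}),
--     ("pipeline_summary", {"pipeline_summary"}),
--     ("verification", {"verification_preview"}),
--     ("timeline", {"timeline_summary", "timeline_events"}),
--     ("report", {"report_excerpt"}),
--     ("text_bundle", {"text_bundle_inventory"}),
--     ("ai_review", {"ai_triage_summary", "ai_top_findings", "ai_next_questions"}),
-- )
--
-- def _review_surface_presence(resource_ids: set[str]) -> dict[str, bool]: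
--     presence: dict[str, bool] = {}
--     for surface, required_ids in REVIEW_SURFACES:
--         if surface == "verification":
--             presence[surface] = "verification_preview" in resource_ids or any(
--                 source_id.startswith("verification_hit_") for source_id in resource_ids
--             )
--             continue
--         presence[surface] = any(source_id in resource_ids for source_id in required_ids)
--     return presence
-- ===== SOURCE B (Python) =====
-- # B: single pass over resource_ids with an inverted id->surface lookup table,
-- # instead of scanning resource_ids once per surface.
-- _SURFACE_OF_ID = {
--     "review_index": "review_index",
--     "pipeline_summary": "pipeline_summary",
--     "verification_preview": "verification",
--     "timeline_summary": "timeline",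
--     "timeline_events": "timeline",
--     "report_excerpt": "report",
--     "text_bundle_inventory": "text_bundle",
--     "ai_triage_summary": "ai_review",
--     "ai_top_findings": "ai_review",
--     "ai_next_questions": "ai_review",
-- }
--
-- _SURFACES = ("review_index", "pipeline_summary", "verification",
--              "timeline", "report", "text_bundle", "ai_review")
--
--
-- def _review_surface_presence(resource_ids: set[str]) -> dict[str, bool]:
--     presence = {surface: False for surface in _SURFACES}
--     for rid in resource_ids:
--         surface = _SURFACE_OF_ID.get(rid)
--         if surface is not None:
--             presence[surface] = True
--         if rid.startswith("verification_hit_"):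
--             presence["verification"] = True
--     return presence
-- ===== Notes on version B (the rewrite author's own statement) =====
-- stated objective: alternative
-- what changed: B replaces A's per-surface scans over resource_ids with one pass over resource_ids using an inverted id-to-surface lookup dict, starting from an all-False presence dict.
import Mathlib
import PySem

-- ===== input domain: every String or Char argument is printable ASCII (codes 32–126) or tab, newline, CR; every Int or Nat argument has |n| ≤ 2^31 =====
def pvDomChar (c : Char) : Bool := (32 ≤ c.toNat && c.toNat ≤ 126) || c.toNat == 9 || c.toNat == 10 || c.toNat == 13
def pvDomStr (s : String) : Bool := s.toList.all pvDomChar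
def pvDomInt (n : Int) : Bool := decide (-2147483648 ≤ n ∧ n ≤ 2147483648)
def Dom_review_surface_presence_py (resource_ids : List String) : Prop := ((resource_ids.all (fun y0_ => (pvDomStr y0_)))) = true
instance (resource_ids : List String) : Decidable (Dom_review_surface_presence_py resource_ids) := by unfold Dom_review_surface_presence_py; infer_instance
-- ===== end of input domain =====

-- B replaces A's per-surface scans over resource_ids with a single pass over resource_ids
-- driven by an inverted id→surface lookup dict (objective: alternative decomposition).

-- ===== PORT A =====
-- module constant REVIEW_SURFACES (each required-id set as the list of its distinct elements)
def pvReviewSurfaces : List (String × List String) :=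
  [("review_index", ["review_index"]),
   ("pipeline_summary", ["pipeline_summary"]),
   ("verification", ["verification_preview"]),
   ("timeline", ["timeline_summary", "timeline_events"]),
   ("report", ["report_excerpt"]),
   ("text_bundle", ["text_bundle_inventory"]),
   ("ai_review", ["ai_triage_summary", "ai_top_findings", "ai_next_questions"])]

def review_surface_presence_py (resource_ids : List String) : List (String × Bool) :=
  (pvReviewSurfaces.foldl
    (fun presence sr =>
      if sr.1 == "verification" then
        presence.insert sr.1 (resource_ids.contains "verification_preview" ||
          resource_ids.any (fun sid => PySem.Str.startswith sid "verification_hit_"))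
      else
        presence.insert sr.1 (sr.2.any (fun sid => resource_ids.contains sid)))
    PySem.Dict.empty).items

-- ===== PORT B =====
-- module constant _SURFACE_OF_ID
def pvSurfaceOfId : PySem.Dict String String :=
  PySem.Dict.ofList
    [("review_index", "review_index"),
     ("pipeline_summary", "pipeline_summary"),
     ("verification_preview", "verification"),
     ("timeline_summary", "timeline"),
     ("timeline_events", "timeline"),
     ("report_excerpt", "report"),
     ("text_bundle_inventory", "text_bundle"),
     ("ai_triage_summary", "ai_review"),
     ("ai_top_findings", "ai_review"),
     ("ai_next_questions", "ai_review")]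

-- body of B's single loop over resource_ids
def pvMark (presence : PySem.Dict String Bool) (rid : String) : PySem.Dict String Bool :=
  let p := match pvSurfaceOfId.get? rid with
           | some surface => presence.insert surface true
           | none => presence
  if PySem.Str.startswith rid "verification_hit_" then p.insert "verification" true else p

def review_surface_presence_py_alt (resource_ids : List String) : List (String × Bool) :=
  (resource_ids.foldl pvMark
    (PySem.Dict.ofList [("review_index", false), ("pipeline_summary", false),
      ("verification", false), ("timeline", false), ("report", false),
      ("text_bundle", false), ("ai_review", false)])).items

-- ===== PRECONDITION & SPEC =====
def Spec_review_surface_presence_py (resource_ids : List String) (out : List (String × Bool)) : Prop := out = review_surface_presence_py_alt resource_ids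
instance (resource_ids : List String) (out : List (String × Bool)) : Decidable (Spec_review_surface_presence_py resource_ids out) := by unfold Spec_review_surface_presence_py; infer_instance

-- ===== CLAIM (what is proved, stated in full; the proofs are below) =====
def Claim_equal_review_surface_presence_py : Prop := ∀ (resource_ids : List String), Dom_review_surface_presence_py resource_ids → Spec_review_surface_presence_py resource_ids (review_surface_presence_py resource_ids)

-- ===== LEMMAS AND PROOFS =====
lemma pvMark_step (b1 b2 b3 b4 b5 b6 b7 : Bool) (rid : String) :
    pvMark (PySem.Dict.mk [("review_index", b1), ("pipeline_summary", b2),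
      ("verification", b3), ("timeline", b4), ("report", b5),
      ("text_bundle", b6), ("ai_review", b7)]) rid =
    PySem.Dict.mk [("review_index", b1 || rid == "review_index"),
      ("pipeline_summary", b2 || rid == "pipeline_summary"),
      ("verification", b3 || rid == "verification_preview" || PySem.Str.startswith rid "verification_hit_"),
      ("timeline", b4 || rid == "timeline_summary" || rid == "timeline_events"),
      ("report", b5 || rid == "report_excerpt"),
      ("text_bundle", b6 || rid == "text_bundle_inventory"),
      ("ai_review", b7 || rid == "ai_triage_summary" || rid == "ai_top_findings" || rid == "ai_next_questions")] := by
  by_cases h1 : rid = "review_index"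
  · subst h1; rw [show pvMark (PySem.Dict.mk [("review_index", b1), ("pipeline_summary", b2), ("verification", b3), ("timeline", b4), ("report", b5), ("text_bundle", b6), ("ai_review", b7)]) "review_index" = PySem.Dict.mk [("review_index", true), ("pipeline_summary", b2), ("verification", b3), ("timeline", b4), ("report", b5), ("text_bundle", b6), ("ai_review", b7)] from rfl]; rw [show PySem.Str.startswith "review_index" "verification_hit_" = false from by decide]; simp
  by_cases h2 : rid = "pipeline_summary"
  · subst h2; rw [show pvMark (PySem.Dict.mk [("review_index", b1), ("pipeline_summary", b2), ("verification", b3), ("timeline", b4), ("report", b5), ("text_bundle", b6), ("ai_review", b7)]) "pipeline_summary" = PySem.Dict.mk [("review_index", b1), ("pipeline_summary", true), ("verification", b3), ("timeline", b4), ("report", b5), ("text_bundle", b6), ("ai_review", b7)] from rfl]; rw [show PySem.Str.startswith "pipeline_summary" "verification_hit_" = false from by decide]; simp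
  by_cases h3 : rid = "verification_preview"
  · subst h3; rw [show pvMark (PySem.Dict.mk [("review_index", b1), ("pipeline_summary", b2), ("verification", b3), ("timeline", b4), ("report", b5), ("text_bundle", b6), ("ai_review", b7)]) "verification_preview" = PySem.Dict.mk [("review_index", b1), ("pipeline_summary", b2), ("verification", true), ("timeline", b4), ("report", b5), ("text_bundle", b6), ("ai_review", b7)] from rfl]; rw [show PySem.Str.startswith "verification_preview" "verification_hit_" = false from by decide]; simp
  by_cases h4 : rid = "timeline_summary"
  · subst h4; rw [show pvMark (PySem.Dict.mk [("review_index", b1), ("pipeline_summary", b2), ("verification", b3), ("timeline", b4), ("report", b5), ("text_bundle", b6), ("ai_review", b7)]) "timeline_summary" = PySem.Dict.mk [("review_index", b1), ("pipeline_summary", b2), ("verification", b3), ("timeline", true), ("report", b5), ("text_bundle", b6), ("ai_review", b7)] from rfl]; rw [show PySem.Str.startswith "timeline_summary" "verification_hit_" = false from by decide]; simp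
  by_cases h5 : rid = "timeline_events"
  · subst h5; rw [show pvMark (PySem.Dict.mk [("review_index", b1), ("pipeline_summary", b2), ("verification", b3), ("timeline", b4), ("report", b5), ("text_bundle", b6), ("ai_review", b7)]) "timeline_events" = PySem.Dict.mk [("review_index", b1), ("pipeline_summary", b2), ("verification", b3), ("timeline", true), ("report", b5), ("text_bundle", b6), ("ai_review", b7)] from rfl]; rw [show PySem.Str.startswith "timeline_events" "verification_hit_" = false from by decide]; simp
  by_cases h6 : rid = "report_excerpt"
  · subst h6; rw [show pvMark (PySem.Dict.mk [("review_index", b1), ("pipeline_summary", b2), ("verification", b3), ("timeline", b4), ("report", b5), ("text_bundle", b6), ("ai_review", b7)]) "report_excerpt" = PySem.Dict.mk [("review_index", b1), ("pipeline_summary", b2), ("verification", b3), ("timeline", b4), ("report", true), ("text_bundle", b6), ("ai_review", b7)] from rfl]; rw [show PySem.Str.startswith "report_excerpt" "verification_hit_" = false from by decide]; simp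
  by_cases h7 : rid = "text_bundle_inventory"
  · subst h7; rw [show pvMark (PySem.Dict.mk [("review_index", b1), ("pipeline_summary", b2), ("verification", b3), ("timeline", b4), ("report", b5), ("text_bundle", b6), ("ai_review", b7)]) "text_bundle_inventory" = PySem.Dict.mk [("review_index", b1), ("pipeline_summary", b2), ("verification", b3), ("timeline", b4), ("report", b5), ("text_bundle", true), ("ai_review", b7)] from rfl]; rw [show PySem.Str.startswith "text_bundle_inventory" "verification_hit_" = false from by decide]; simp
  by_cases h8 : rid = "ai_triage_summary"
  · subst h8; rw [show pvMark (PySem.Dict.mk [("review_index", b1), ("pipeline_summary", b2), ("verification", b3), ("timeline", b4), ("report", b5), ("text_bundle", b6), ("ai_review", b7)]) "ai_triage_summary" = PySem.Dict.mk [("review_index", b1), ("pipeline_summary", b2), ("verification", b3), ("timeline", b4), ("report", b5), ("text_bundle", b6), ("ai_review", true)] from rfl]; rw [show PySem.Str.startswith "ai_triage_summary" "verification_hit_" = false from by decide]; simp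
  by_cases h9 : rid = "ai_top_findings"
  · subst h9; rw [show pvMark (PySem.Dict.mk [("review_index", b1), ("pipeline_summary", b2), ("verification", b3), ("timeline", b4), ("report", b5), ("text_bundle", b6), ("ai_review", b7)]) "ai_top_findings" = PySem.Dict.mk [("review_index", b1), ("pipeline_summary", b2), ("verification", b3), ("timeline", b4), ("report", b5), ("text_bundle", b6), ("ai_review", true)] from rfl]; rw [show PySem.Str.startswith "ai_top_findings" "verification_hit_" = false from by decide]; simp
  by_cases h10 : rid = "ai_next_questions"
  · subst h10; rw [show pvMark (PySem.Dict.mk [("review_index", b1), ("pipeline_summary", b2), ("verification", b3), ("timeline", b4), ("report", b5), ("text_bundle", b6), ("ai_review", b7)]) "ai_next_questions" = PySem.Dict.mk [("review_index", b1), ("pipeline_summary", b2), ("verification", b3), ("timeline", b4), ("report", b5), ("text_bundle", b6), ("ai_review", true)] from rfl]; rw [show PySem.Str.startswith "ai_next_questions" "verification_hit_" = false from by decide]; simp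
  have f1 : ("review_index" == rid) = false := by simp [Ne.symm h1]
  have f2 : ("pipeline_summary" == rid) = false := by simp [Ne.symm h2]
  have f3 : ("verification_preview" == rid) = false := by simp [Ne.symm h3]
  have f4 : ("timeline_summary" == rid) = false := by simp [Ne.symm h4]
  have f5 : ("timeline_events" == rid) = false := by simp [Ne.symm h5]
  have f6 : ("report_excerpt" == rid) = false := by simp [Ne.symm h6]
  have f7 : ("text_bundle_inventory" == rid) = false := by simp [Ne.symm h7]
  have f8 : ("ai_triage_summary" == rid) = false := by simp [Ne.symm h8]
  have f9 : ("ai_top_findings" == rid) = false := by simp [Ne.symm h9]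
  have f10 : ("ai_next_questions" == rid) = false := by simp [Ne.symm h10]
  simp only [pvMark, show pvSurfaceOfId = PySem.Dict.mk [("review_index", "review_index"), ("pipeline_summary", "pipeline_summary"), ("verification_preview", "verification"), ("timeline_summary", "timeline"), ("timeline_events", "timeline"), ("report_excerpt", "report"), ("text_bundle_inventory", "text_bundle"), ("ai_triage_summary", "ai_review"), ("ai_top_findings", "ai_review"), ("ai_next_questions", "ai_review")] from rfl,
    PySem.Dict.get?, List.find?_cons, List.find?_nil, f1, f2, f3, f4, f5, f6, f7, f8, f9, f10,
    Option.map_none]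
  have g4 : (rid == "timeline_summary") = false := by simp [h4]
  have g5 : (rid == "timeline_events") = false := by simp [h5]
  have g8 : (rid == "ai_triage_summary") = false := by simp [h8]
  have g9 : (rid == "ai_top_findings") = false := by simp [h9]
  have g10 : (rid == "ai_next_questions") = false := by simp [h10]
  cases hsw : PySem.Str.startswith rid "verification_hit_"
  · rw [if_neg (by simp)]
    simp [h1, h2, h3, h6, h7, g4, g5, g8, g9, g10, beq_iff_eq]
  · rw [if_pos (by simp), show (PySem.Dict.mk [("review_index", b1), ("pipeline_summary", b2), ("verification", b3), ("timeline", b4), ("report", b5), ("text_bundle", b6), ("ai_review", b7)]).insert "verification" true = PySem.Dict.mk [("review_index", b1), ("pipeline_summary", b2), ("verification", true), ("timeline", b4), ("report", b5), ("text_bundle", b6), ("ai_review", b7)] from rfl]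
    simp [h1, h2, h6, h7, g4, g5, g8, g9, g10, beq_iff_eq]

lemma pvMark_foldl (l : List String) (b1 b2 b3 b4 b5 b6 b7 : Bool) :
    l.foldl pvMark (PySem.Dict.mk [("review_index", b1), ("pipeline_summary", b2),
      ("verification", b3), ("timeline", b4), ("report", b5),
      ("text_bundle", b6), ("ai_review", b7)]) =
    PySem.Dict.mk [("review_index", b1 || l.contains "review_index"),
      ("pipeline_summary", b2 || l.contains "pipeline_summary"),
      ("verification", b3 || l.contains "verification_preview" || l.any (fun s => PySem.Str.startswith s "verification_hit_")),
      ("timeline", b4 || l.contains "timeline_summary" || l.contains "timeline_events"),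
      ("report", b5 || l.contains "report_excerpt"),
      ("text_bundle", b6 || l.contains "text_bundle_inventory"),
      ("ai_review", b7 || l.contains "ai_triage_summary" || l.contains "ai_top_findings" || l.contains "ai_next_questions")] := by
  induction l generalizing b1 b2 b3 b4 b5 b6 b7 with
  | nil => simp
  | cons rid tl ih =>
    rw [List.foldl_cons, pvMark_step, ih]
    simp [List.any_cons, beq_eq_decide, eq_comm, Bool.or_assoc, Bool.or_comm, Bool.or_left_comm]


-- ===== VERDICT (by name: the statement is the Claim_ definition above) =====
theorem review_surface_presence_py_spec : Claim_equal_review_surface_presence_py := by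
  intro l _
  unfold Spec_review_surface_presence_py review_surface_presence_py_alt
  rw [show PySem.Dict.ofList [("review_index", false), ("pipeline_summary", false),
      ("verification", false), ("timeline", false), ("report", false),
      ("text_bundle", false), ("ai_review", false)] =
    PySem.Dict.mk [("review_index", false), ("pipeline_summary", false),
      ("verification", false), ("timeline", false), ("report", false),
      ("text_bundle", false), ("ai_review", false)] from rfl,
    pvMark_foldl]
  rw [show review_surface_presence_py l =
    [("review_index", l.contains "review_index" || false),
     ("pipeline_summary", l.contains "pipeline_summary" || false),
     ("verification", l.contains "verification_preview" || l.any (fun sid => PySem.Str.startswith sid "verification_hit_")),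
     ("timeline", l.contains "timeline_summary" || (l.contains "timeline_events" || false)),
     ("report", l.contains "report_excerpt" || false),
     ("text_bundle", l.contains "text_bundle_inventory" || false),
     ("ai_review", l.contains "ai_triage_summary" || (l.contains "ai_top_findings" || (l.contains "ai_next_questions" || false)))] from rfl]
  simp [Bool.or_assoc]
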